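-- pv_equiv track=rewrite | github.com/mbachelier1/cours_mkdocs | wip/comparaison alignements.py | aligner_dyn_affiche
-- ===== SOURCE A (Python) =====
-- def aligner_dyn_affiche(x, y):
--     n = len(x) + 1
--     m = len(y) + 1
--     score = [[(0, '', '') for _ in range(m)] for _ in range(n)]  # tableau des scores et des motifs obtenus
--
--     for i in range(n):
--         score[i][0] = (i, x[:i], '-' * i)
--
--     for j in range(m):
--         score[0][j] = (j, '-' * j, y[:j])
--
--     for i in range(1, n):
--         for j in range(1, m):
--             if x[i - 1] == y[j - 1]:
--                 total, xmotif, ymotif = score[i - 1][j - 1]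
--                 score[i][j] = (total, xmotif + x[i - 1], ymotif + y[j - 1])
--             else:
--                 total1, xmotif1, ymotif1 = score[i][j - 1]
--                 total2, xmotif2, ymotif2 = score[i - 1][j]
--
--                 if total1 <= total2:
--                     total = 1 + total1
--                     xmotif = xmotif1 + '-'
--                     ymotif = ymotif1 + y[j - 1]
--                 else:
--                     total = 1 + total2
--                     xmotif = xmotif2 + x[i - 1]
--                     ymotif = ymotif2 + '-'
--
--                 score[i][j] = (total, xmotif, ymotif)
--
--     return score[n - 1][m - 1]
-- ===== SOURCE B (Python) =====
-- def aligner_dyn_affiche(x, y):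
--     n, m = len(x), len(y)
--     # integer cost table only (no string building in the O(n*m) fill)
--     cost = [[0] * (m + 1) for _ in range(n + 1)]
--     for i in range(n + 1):
--         cost[i][0] = i
--     for j in range(m + 1):
--         cost[0][j] = j
--     for i in range(1, n + 1):
--         for j in range(1, m + 1):
--             if x[i - 1] == y[j - 1]:
--                 cost[i][j] = cost[i - 1][j - 1]
--             else:
--                 a = cost[i][j - 1]
--                 b = cost[i - 1][j]
--                 cost[i][j] = 1 + (a if a <= b else b)
--     # single backtrack replaying the same tie-breaks to build the strings
--     xs = []
--     ys = []
--     i, j = n, m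
--     while i > 0 and j > 0:
--         if x[i - 1] == y[j - 1]:
--             xs.append(x[i - 1])
--             ys.append(y[j - 1])
--             i -= 1
--             j -= 1
--         elif cost[i][j - 1] <= cost[i - 1][j]:
--             xs.append('-')
--             ys.append(y[j - 1])
--             j -= 1
--         else:
--             xs.append(x[i - 1])
--             ys.append('-')
--             i -= 1
--     xmotif = x[:i] + '-' * j + ''.join(reversed(xs))
--     ymotif = '-' * i + y[:j] + ''.join(reversed(ys))
--     return (cost[n][m], xmotif, ymotif)
-- ===== Notes on version B (the rewrite author's own statement) =====
-- stated objective: alternative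
-- what changed: B fills an integer-only DP cost table and reconstructs the two aligned strings in a single backtrack that replays A's tie-breaks, instead of A's table of (score, string, string) triples that concatenates growing motif strings in every cell (measured 6.9x at n=256, but a timing run could not confirm it at larger sizes, so no speed is claimed).
import Mathlib
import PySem

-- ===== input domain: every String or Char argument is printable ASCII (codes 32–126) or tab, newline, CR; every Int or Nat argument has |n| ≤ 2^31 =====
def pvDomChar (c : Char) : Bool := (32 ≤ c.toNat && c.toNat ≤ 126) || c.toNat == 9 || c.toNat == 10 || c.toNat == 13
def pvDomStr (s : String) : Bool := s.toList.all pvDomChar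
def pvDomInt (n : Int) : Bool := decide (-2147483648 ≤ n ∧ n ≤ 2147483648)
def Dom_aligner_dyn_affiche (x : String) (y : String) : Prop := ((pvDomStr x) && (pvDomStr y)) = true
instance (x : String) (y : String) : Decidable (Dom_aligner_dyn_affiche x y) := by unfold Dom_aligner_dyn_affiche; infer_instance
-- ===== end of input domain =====

-- B replaces A's table of (score, string, string) triples (string concatenation in every
-- cell) by an integer-only DP table plus a single backtrack that replays the same
-- tie-breaks to rebuild the two aligned strings.
-- In both ports, Python strings are carried as List Char (exact) and packed with
-- String.mk only in the returned value.

-- ===== PORT A =====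
-- shared helpers for Python list-of-lists matrices: score[i][j] read / in-place write
def pvMget {α : Type} (d : α) (s : List (List α)) (i j : Nat) : α := (s.getD i []).getD j d
def pvMset {α : Type} (s : List (List α)) (i j : Nat) (v : α) : List (List α) :=
  s.set i ((s.getD i []).set j v)

def pvD0 : Int × List Char × List Char := (0, [], [])

def aligner_dyn_affiche (x : String) (y : String) : Int × String × String :=
  let xs := x.toList
  let ys := y.toList
  let n := xs.length + 1
  let m := ys.length + 1
  let score := (List.range n).map (fun _ => (List.range m).map (fun _ => pvD0))
  let score := (List.range n).foldl
    (fun s i => pvMset s i 0 ((i : Int), xs.take i, List.replicate i '-')) score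
  let score := (List.range m).foldl
    (fun s j => pvMset s 0 j ((j : Int), List.replicate j '-', ys.take j)) score
  let score := (List.range' 1 (n - 1)).foldl (fun s i =>
    (List.range' 1 (m - 1)).foldl (fun s j =>
      if xs.getD (i - 1) ' ' == ys.getD (j - 1) ' ' then
        let p := pvMget pvD0 s (i - 1) (j - 1)
        pvMset s i j (p.1, p.2.1 ++ [xs.getD (i - 1) ' '], p.2.2 ++ [ys.getD (j - 1) ' '])
      else
        let p1 := pvMget pvD0 s i (j - 1)
        let p2 := pvMget pvD0 s (i - 1) j
        if p1.1 ≤ p2.1 then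
          pvMset s i j (1 + p1.1, p1.2.1 ++ ['-'], p1.2.2 ++ [ys.getD (j - 1) ' '])
        else
          pvMset s i j (1 + p2.1, p2.2.1 ++ [xs.getD (i - 1) ' '], p2.2.2 ++ ['-'])) s) score
  let r := pvMget pvD0 score (n - 1) (m - 1)
  (r.1, String.mk r.2.1, String.mk r.2.2)

-- ===== PORT B =====
-- the backtrack while-loop of Source B (xs.append / ys.append, reversed at the end)
def pvBtLoop (xs ys : List Char) (cost : List (List Int)) :
    Nat → Nat → List Char → List Char → Nat × Nat × List Char × List Char
  | i + 1, j + 1, ax, ay =>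
    if xs.getD i ' ' == ys.getD j ' ' then
      pvBtLoop xs ys cost i j (ax ++ [xs.getD i ' ']) (ay ++ [ys.getD j ' '])
    else if pvMget 0 cost (i + 1) j ≤ pvMget 0 cost i (j + 1) then
      pvBtLoop xs ys cost (i + 1) j (ax ++ ['-']) (ay ++ [ys.getD j ' '])
    else
      pvBtLoop xs ys cost i (j + 1) (ax ++ [xs.getD i ' ']) (ay ++ ['-'])
  | i, 0, ax, ay => (i, 0, ax, ay)
  | 0, j, ax, ay => (0, j, ax, ay)
termination_by i j ax ay => i + j

def aligner_dyn_affiche_alt (x : String) (y : String) : Int × String × String :=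
  let xs := x.toList
  let ys := y.toList
  let n := xs.length
  let m := ys.length
  let cost : List (List Int) :=
    (List.range (n + 1)).map (fun _ => (List.range (m + 1)).map (fun _ => 0))
  let cost := (List.range (n + 1)).foldl (fun s i => pvMset s i 0 (i : Int)) cost
  let cost := (List.range (m + 1)).foldl (fun s j => pvMset s 0 j (j : Int)) cost
  let cost := (List.range' 1 n).foldl (fun s i =>
    (List.range' 1 m).foldl (fun s j =>
      if xs.getD (i - 1) ' ' == ys.getD (j - 1) ' ' then
        pvMset s i j (pvMget 0 s (i - 1) (j - 1))
      else
        let a := pvMget 0 s i (j - 1)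
        let b := pvMget 0 s (i - 1) j
        pvMset s i j (1 + (if a ≤ b then a else b))) s) cost
  let r := pvBtLoop xs ys cost n m [] []
  (pvMget 0 cost n m,
   String.mk (xs.take r.1 ++ (List.replicate r.2.1 '-' ++ r.2.2.1.reverse)),
   String.mk (List.replicate r.1 '-' ++ (ys.take r.2.1 ++ r.2.2.2.reverse)))

-- ===== PRECONDITION & SPEC =====
def Spec_aligner_dyn_affiche (x : String) (y : String) (out : Int × String × String) : Prop := out = aligner_dyn_affiche_alt x y
instance (x : String) (y : String) (out : Int × String × String) : Decidable (Spec_aligner_dyn_affiche x y out) := by unfold Spec_aligner_dyn_affiche; infer_instance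

-- ===== CLAIM (what is proved, stated in full; the proofs are below) =====
def Claim_equal_aligner_dyn_affiche : Prop := ∀ (x : String) (y : String), Dom_aligner_dyn_affiche x y → Spec_aligner_dyn_affiche x y (aligner_dyn_affiche x y)

-- ===== LEMMAS AND PROOFS =====

-- the alignment recurrence both programs compute: (score, x-motif, y-motif) at (i, j)
def pvT (xs ys : List Char) : Nat → Nat → Int × List Char × List Char
  | i + 1, j + 1 =>
    if xs.getD i ' ' == ys.getD j ' ' then
      let p := pvT xs ys i j
      (p.1, p.2.1 ++ [xs.getD i ' '], p.2.2 ++ [ys.getD j ' '])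
    else
      let p1 := pvT xs ys (i + 1) j
      let p2 := pvT xs ys i (j + 1)
      if p1.1 ≤ p2.1 then (1 + p1.1, p1.2.1 ++ ['-'], p1.2.2 ++ [ys.getD j ' '])
      else (1 + p2.1, p2.2.1 ++ [xs.getD i ' '], p2.2.2 ++ ['-'])
  | i, 0 => ((i : Int), xs.take i, List.replicate i '-')
  | 0, j => ((j : Int), List.replicate j '-', ys.take j)
termination_by i j => i + j

lemma pvT_i0 (xs ys : List Char) (i : Nat) :
    pvT xs ys i 0 = ((i : Int), xs.take i, List.replicate i '-') := by
  cases i <;> simp [pvT]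

lemma pvT_0j (xs ys : List Char) (j : Nat) :
    pvT xs ys 0 j = ((j : Int), List.replicate j '-', ys.take j) := by
  cases j <;> simp [pvT]

def pvShape {α : Type} (s : List (List α)) (n m : Nat) : Prop :=
  s.length = n ∧ ∀ r ∈ s, r.length = m

lemma pvRow_len {α : Type} {s : List (List α)} {n m i : Nat}
    (h : pvShape s n m) (hi : i < n) : (s.getD i []).length = m := by
  obtain ⟨hl, hr⟩ := h
  have hi' : i < s.length := by omega
  rw [List.getD_eq_getElem?_getD, List.getElem?_eq_getElem hi']
  exact hr _ (List.getElem_mem hi')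

lemma pvGetD_set_self {α : Type} (s : List α) (i : Nat) (v d : α) (h : i < s.length) :
    (s.set i v).getD i d = v := by
  rw [List.getD_eq_getElem?_getD, List.getElem?_set_self h]
  rfl

lemma pvGetD_set_ne {α : Type} (s : List α) (i i' : Nat) (v d : α) (h : i ≠ i') :
    (s.set i v).getD i' d = s.getD i' d := by
  rw [List.getD_eq_getElem?_getD, List.getElem?_set_ne h, ← List.getD_eq_getElem?_getD]

lemma pvGetD_set_oob {α : Type} (s : List α) (i : Nat) (v d : α) (h : ¬ i < s.length) :
    (s.set i v).getD i d = s.getD i d := by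
  have h1 : (s.set i v)[i]? = none := List.getElem?_eq_none (by simp; omega)
  have h2 : s[i]? = none := List.getElem?_eq_none (by omega)
  rw [List.getD_eq_getElem?_getD, h1, List.getD_eq_getElem?_getD, h2]

lemma pvMget_mset_eq {α : Type} (d : α) {s : List (List α)} {n m : Nat}
    (hs : pvShape s n m) {i j : Nat} (hi : i < n) (hj : j < m) (v : α) :
    pvMget d (pvMset s i j v) i j = v := by
  have hl := hs.1
  have hi' : i < s.length := by omega
  have hj' : j < (s.getD i []).length := by rw [pvRow_len hs hi]; omega
  unfold pvMget pvMset
  rw [pvGetD_set_self _ _ _ _ hi', pvGetD_set_self _ _ _ _ hj']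

lemma pvMget_mset_ne {α : Type} (d : α) (s : List (List α)) {i j i' j' : Nat}
    (h : i ≠ i' ∨ j ≠ j') (v : α) :
    pvMget d (pvMset s i j v) i' j' = pvMget d s i' j' := by
  unfold pvMget pvMset
  by_cases hii : i = i'
  · subst hii
    have hjj : j ≠ j' := by tauto
    by_cases hlen : i < s.length
    · rw [pvGetD_set_self _ _ _ _ hlen, pvGetD_set_ne _ _ _ _ _ hjj]
    · rw [pvGetD_set_oob _ _ _ _ hlen]
  · rw [pvGetD_set_ne _ _ _ _ _ hii]

lemma pvShape_mset {α : Type} {s : List (List α)} {n m : Nat} (hs : pvShape s n m)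
    {i : Nat} (hi : i < n) (j : Nat) (v : α) : pvShape (pvMset s i j v) n m := by
  obtain ⟨hl, hr⟩ := hs
  refine ⟨by simp [pvMset, hl], ?_⟩
  intro r hrm
  rcases List.mem_or_eq_of_mem_set hrm with h | h
  · exact hr _ h
  · subst h
    rw [List.length_set]
    exact pvRow_len ⟨hl, hr⟩ hi

-- generic filling of one cell from its three neighbours
def pvStep {α : Type} (d : α) (g : α → α → α → Nat → Nat → α)
    (s : List (List α)) (i j : Nat) : List (List α) :=
  pvMset s i j (g (pvMget d s (i - 1) (j - 1)) (pvMget d s i (j - 1)) (pvMget d s (i - 1) j) i j)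

lemma pvFill_inner {α : Type} (d : α) (g : α → α → α → Nat → Nat → α)
    (T : Nat → Nat → α) (n m i : Nat)
    (hT : ∀ a b, T (a + 1) (b + 1) = g (T a b) (T (a + 1) b) (T a (b + 1)) (a + 1) (b + 1))
    (hi1 : 1 ≤ i) (hin : i < n) :
    ∀ (k j0 : Nat) (s : List (List α)), pvShape s n m → 1 ≤ j0 → j0 + k = m →
    (∀ j' < m, pvMget d s (i - 1) j' = T (i - 1) j') →
    (∀ j' < j0, pvMget d s i j' = T i j') →
    pvShape ((List.range' j0 k).foldl (fun s j => pvStep d g s i j) s) n m ∧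
    (∀ i' j', i' ≠ i →
      pvMget d ((List.range' j0 k).foldl (fun s j => pvStep d g s i j) s) i' j' = pvMget d s i' j') ∧
    (∀ j' < m, pvMget d ((List.range' j0 k).foldl (fun s j => pvStep d g s i j) s) i j' = T i j') := by
  intro k
  induction k with
  | zero =>
    intro j0 s hs hj0 hm hprev hrow
    simp only [List.range'_zero, List.foldl_nil]
    exact ⟨hs, by intros; trivial, fun j' hj' => hrow j' (by omega)⟩
  | succ k ih =>
    intro j0 s hs hj0 hm hprev hrow
    rw [List.range'_succ]
    simp only [List.foldl_cons]
    have hj0m : j0 < m := by omega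
    have hs1 : pvShape (pvStep d g s i j0) n m := pvShape_mset hs hin _ _
    have hset : ∀ i' j', i' ≠ i ∨ j' ≠ j0 →
        pvMget d (pvStep d g s i j0) i' j' = pvMget d s i' j' := by
      intro i' j' h
      exact pvMget_mset_ne d s (by tauto) _
    have hprev1 : ∀ j' < m, pvMget d (pvStep d g s i j0) (i - 1) j' = T (i - 1) j' := by
      intro j' hj'
      rw [hset _ _ (Or.inl (by omega))]; exact hprev j' hj'
    have hrow1 : ∀ j' < j0 + 1, pvMget d (pvStep d g s i j0) i j' = T i j' := by
      intro j' hj'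
      by_cases hlt : j' < j0
      · rw [hset _ _ (Or.inr (by omega))]; exact hrow j' hlt
      · have hjj : j' = j0 := by omega
        subst hjj
        unfold pvStep
        rw [pvMget_mset_eq d hs hin hj0m]
        obtain ⟨a, rfl⟩ : ∃ a, i = a + 1 := ⟨i - 1, by omega⟩
        obtain ⟨b, rfl⟩ : ∃ b, j' = b + 1 := ⟨j' - 1, by omega⟩
        simp only [Nat.add_sub_cancel] at hprev hrow ⊢
        rw [hprev b (by omega), hrow b (by omega), hprev (b + 1) (by omega)]
        exact (hT a b).symm
    obtain ⟨sh, pres, row⟩ := ih (j0 + 1) (pvStep d g s i j0) hs1 (by omega) (by omega) hprev1 hrow1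
    refine ⟨sh, ?_, row⟩
    intro i' j' hne
    rw [pres i' j' hne, hset _ _ (Or.inl hne)]

lemma pvFill_outer {α : Type} (d : α) (g : α → α → α → Nat → Nat → α)
    (T : Nat → Nat → α) (n m : Nat)
    (hT : ∀ a b, T (a + 1) (b + 1) = g (T a b) (T (a + 1) b) (T a (b + 1)) (a + 1) (b + 1))
    (hm : 1 ≤ m) :
    ∀ (k i0 : Nat) (s : List (List α)), pvShape s n m → 1 ≤ i0 → i0 + k = n →
    (∀ i' j', i' < i0 → j' < m → pvMget d s i' j' = T i' j') →
    (∀ i' < n, pvMget d s i' 0 = T i' 0) →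
    ∀ i' j', i' < n → j' < m →
      pvMget d ((List.range' i0 k).foldl
        (fun s i => (List.range' 1 (m - 1)).foldl (fun s j => pvStep d g s i j) s) s) i' j'
      = T i' j' := by
  intro k
  induction k with
  | zero =>
    intro i0 s hs hi0 hn hdone hcol i' j' hi' hj'
    simp only [List.range'_zero, List.foldl_nil]
    exact hdone i' j' (by omega) hj'
  | succ k ih =>
    intro i0 s hs hi0 hn hdone hcol i' j' hi' hj'
    rw [List.range'_succ]
    simp only [List.foldl_cons]
    have hi0n : i0 < n := by omega
    obtain ⟨sh1, pres1, row1⟩ :=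
      pvFill_inner d g T n m i0 hT hi0 hi0n (m - 1) 1 s hs (by omega) (by omega)
        (fun j' hj' => hdone (i0 - 1) j' (by omega) hj')
        (fun j' hj' => by
          have : j' = 0 := by omega
          subst this; exact hcol i0 hi0n)
    exact ih (i0 + 1)
      ((List.range' 1 (m - 1)).foldl (fun s j => pvStep d g s i0 j) s) sh1 (by omega) (by omega)
      (fun a b ha hb => by
        by_cases hai : a = i0
        · subst hai; exact row1 b hb
        · rw [pres1 a b hai]; exact hdone a b (by omega) hb)
      (fun a ha => by
        by_cases hai : a = i0
        · subst hai; exact row1 0 (by omega)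
        · rw [pres1 a 0 hai]; exact hcol a ha)
      i' j' hi' hj'

-- the two border-initialisation folds
lemma pvInitCol {α : Type} (d : α) (f : Nat → α) (n m : Nat) (hm : 1 ≤ m) :
    ∀ (k : Nat) (s : List (List α)), k ≤ n → pvShape s n m →
    pvShape ((List.range k).foldl (fun s i => pvMset s i 0 (f i)) s) n m ∧
    (∀ i < k, pvMget d ((List.range k).foldl (fun s i => pvMset s i 0 (f i)) s) i 0 = f i) ∧
    (∀ i j, k ≤ i ∨ j ≠ 0 →
      pvMget d ((List.range k).foldl (fun s i => pvMset s i 0 (f i)) s) i j = pvMget d s i j) := by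
  intro k
  induction k with
  | zero =>
    intro s _ hs
    exact ⟨hs, by omega, fun _ _ _ => rfl⟩
  | succ k ih =>
    intro s hk hs
    rw [List.range_succ]
    simp only [List.foldl_append, List.foldl_cons, List.foldl_nil]
    obtain ⟨sh, heq, hpr⟩ := ih s (by omega) hs
    have hkn : k < n := by omega
    refine ⟨pvShape_mset sh hkn _ _, ?_, ?_⟩
    · intro i hi
      by_cases hik : i < k
      · rw [pvMget_mset_ne d _ (Or.inl (by omega))]; exact heq i hik
      · have : i = k := by omega
        subst this
        exact pvMget_mset_eq d sh hkn hm _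
    · intro i j h
      rw [pvMget_mset_ne d _ (by omega), hpr i j (by omega)]

lemma pvInitRow {α : Type} (d : α) (f : Nat → α) (n m : Nat) (hn : 1 ≤ n) :
    ∀ (k : Nat) (s : List (List α)), k ≤ m → pvShape s n m →
    pvShape ((List.range k).foldl (fun s j => pvMset s 0 j (f j)) s) n m ∧
    (∀ j < k, pvMget d ((List.range k).foldl (fun s j => pvMset s 0 j (f j)) s) 0 j = f j) ∧
    (∀ i j, k ≤ j ∨ i ≠ 0 →
      pvMget d ((List.range k).foldl (fun s j => pvMset s 0 j (f j)) s) i j = pvMget d s i j) := by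
  intro k
  induction k with
  | zero =>
    intro s _ hs
    exact ⟨hs, by omega, fun _ _ _ => rfl⟩
  | succ k ih =>
    intro s hk hs
    rw [List.range_succ]
    simp only [List.foldl_append, List.foldl_cons, List.foldl_nil]
    obtain ⟨sh, heq, hpr⟩ := ih s (by omega) hs
    have hkm : k < m := by omega
    refine ⟨pvShape_mset sh (by omega) _ _, ?_, ?_⟩
    · intro j hj
      by_cases hjk : j < k
      · rw [pvMget_mset_ne d _ (Or.inr (by omega))]; exact heq j hjk
      · have : j = k := by omega
        subst this
        exact pvMget_mset_eq d sh (by omega) hkm _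
    · intro i j h
      rw [pvMget_mset_ne d _ (by omega), hpr i j (by omega)]

lemma pvShape_init {α : Type} (v : α) (n m : Nat) :
    pvShape ((List.range n).map (fun _ => (List.range m).map (fun _ => v))) n m := by
  constructor
  · simp
  · intro r hr
    simp only [List.mem_map] at hr
    obtain ⟨_, _, rfl⟩ := hr
    simp

-- cell functions of the two ports
def pvGA (xs ys : List Char) (diag left up : Int × List Char × List Char) (i j : Nat) :
    Int × List Char × List Char :=
  if xs.getD (i - 1) ' ' == ys.getD (j - 1) ' ' then
    (diag.1, diag.2.1 ++ [xs.getD (i - 1) ' '], diag.2.2 ++ [ys.getD (j - 1) ' '])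
  else if left.1 ≤ up.1 then (1 + left.1, left.2.1 ++ ['-'], left.2.2 ++ [ys.getD (j - 1) ' '])
  else (1 + up.1, up.2.1 ++ [xs.getD (i - 1) ' '], up.2.2 ++ ['-'])

def pvGB (xs ys : List Char) (diag left up : Int) (i j : Nat) : Int :=
  if xs.getD (i - 1) ' ' == ys.getD (j - 1) ' ' then diag
  else 1 + (if left ≤ up then left else up)

lemma pvBodyA_eq (xs ys : List Char) (i : Nat) :
    (fun (s : List (List (Int × List Char × List Char))) (j : Nat) =>
      if xs.getD (i - 1) ' ' == ys.getD (j - 1) ' ' then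
        let p := pvMget pvD0 s (i - 1) (j - 1)
        pvMset s i j (p.1, p.2.1 ++ [xs.getD (i - 1) ' '], p.2.2 ++ [ys.getD (j - 1) ' '])
      else
        let p1 := pvMget pvD0 s i (j - 1)
        let p2 := pvMget pvD0 s (i - 1) j
        if p1.1 ≤ p2.1 then
          pvMset s i j (1 + p1.1, p1.2.1 ++ ['-'], p1.2.2 ++ [ys.getD (j - 1) ' '])
        else
          pvMset s i j (1 + p2.1, p2.2.1 ++ [xs.getD (i - 1) ' '], p2.2.2 ++ ['-']))
    = fun s j => pvStep pvD0 (pvGA xs ys) s i j := by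
  funext s j
  simp only [pvStep, pvGA, apply_ite (pvMset s i j)]

lemma pvBodyB_eq (xs ys : List Char) (i : Nat) :
    (fun (s : List (List Int)) (j : Nat) =>
      if xs.getD (i - 1) ' ' == ys.getD (j - 1) ' ' then
        pvMset s i j (pvMget 0 s (i - 1) (j - 1))
      else
        let a := pvMget 0 s i (j - 1)
        let b := pvMget 0 s (i - 1) j
        pvMset s i j (1 + (if a ≤ b then a else b)))
    = fun s j => pvStep 0 (pvGB xs ys) s i j := by
  funext s j
  simp only [pvStep, pvGB, apply_ite (pvMset s i j)]

lemma pvT_step_A (xs ys : List Char) (a b : Nat) :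
    pvT xs ys (a + 1) (b + 1) =
      pvGA xs ys (pvT xs ys a b) (pvT xs ys (a + 1) b) (pvT xs ys a (b + 1)) (a + 1) (b + 1) := by
  simp only [pvT, pvGA, Nat.add_sub_cancel]

lemma pvT_step_B (xs ys : List Char) (a b : Nat) :
    (pvT xs ys (a + 1) (b + 1)).1 =
      pvGB xs ys (pvT xs ys a b).1 (pvT xs ys (a + 1) b).1 (pvT xs ys a (b + 1)).1 (a + 1) (b + 1) := by
  simp only [pvT, pvGB, Nat.add_sub_cancel]
  split
  · rfl
  · split <;> rfl

-- the filled score table of port A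
lemma pvTableA (xs ys : List Char) :
    ∀ i j, i < xs.length + 1 → j < ys.length + 1 →
    pvMget pvD0
      ((List.range' 1 (xs.length + 1 - 1)).foldl (fun s i =>
        (List.range' 1 (ys.length + 1 - 1)).foldl (fun s j => pvStep pvD0 (pvGA xs ys) s i j) s)
        ((List.range (ys.length + 1)).foldl
          (fun s j => pvMset s 0 j ((j : Int), List.replicate j '-', ys.take j))
          ((List.range (xs.length + 1)).foldl
            (fun s i => pvMset s i 0 ((i : Int), xs.take i, List.replicate i '-'))
            ((List.range (xs.length + 1)).map
              (fun _ => (List.range (ys.length + 1)).map (fun _ => pvD0)))))) i j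
    = pvT xs ys i j := by
  intro i j hi hj
  set n := xs.length + 1 with hn
  set m := ys.length + 1 with hm
  obtain ⟨sh1, heq1, hpr1⟩ :=
    pvInitCol pvD0 (fun i => ((i : Int), xs.take i, List.replicate i '-')) n m (by omega) n
      ((List.range n).map (fun _ => (List.range m).map (fun _ => pvD0)))
      (by omega) (pvShape_init pvD0 n m)
  obtain ⟨sh2, heq2, hpr2⟩ :=
    pvInitRow pvD0 (fun j => ((j : Int), List.replicate j '-', ys.take j)) n m (by omega) m
      _ (by omega) sh1
  refine pvFill_outer pvD0 (pvGA xs ys) (pvT xs ys) n m (pvT_step_A xs ys) (by omega)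
    (n - 1) 1 _ sh2 (by omega) (by omega) ?_ ?_ i j hi hj
  · intro i' j' hi' hj'
    have : i' = 0 := by omega
    subst this
    rw [heq2 j' hj']
    simp [pvT_0j]
  · intro i' hi'
    by_cases h0 : i' = 0
    · subst h0
      rw [heq2 0 (by omega)]
      simp [pvT_0j]
    · rw [hpr2 i' 0 (Or.inr h0), heq1 i' hi']
      simp [pvT_i0]

-- the filled cost table of port B
lemma pvTableB (xs ys : List Char) :
    ∀ i j, i < xs.length + 1 → j < ys.length + 1 →
    pvMget 0
      ((List.range' 1 xs.length).foldl (fun s i =>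
        (List.range' 1 ys.length).foldl (fun s j => pvStep 0 (pvGB xs ys) s i j) s)
        ((List.range (ys.length + 1)).foldl (fun s j => pvMset s 0 j (j : Int))
          ((List.range (xs.length + 1)).foldl (fun s i => pvMset s i 0 (i : Int))
            ((List.range (xs.length + 1)).map
              (fun _ => (List.range (ys.length + 1)).map (fun _ => (0 : Int))))))) i j
    = (pvT xs ys i j).1 := by
  intro i j hi hj
  set n := xs.length + 1 with hn
  set m := ys.length + 1 with hm
  obtain ⟨sh1, heq1, hpr1⟩ :=
    pvInitCol (0 : Int) (fun i => (i : Int)) n m (by omega) n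
      ((List.range n).map (fun _ => (List.range m).map (fun _ => (0 : Int))))
      (by omega) (pvShape_init 0 n m)
  obtain ⟨sh2, heq2, hpr2⟩ :=
    pvInitRow (0 : Int) (fun j => (j : Int)) n m (by omega) m _ (by omega) sh1
  have hfold : (List.range' 1 xs.length) = (List.range' 1 (n - 1)) := by
    simp [hn]
  have hfoldm : (List.range' 1 ys.length) = (List.range' 1 (m - 1)) := by
    simp [hm]
  rw [hfold, hfoldm]
  refine pvFill_outer (0 : Int) (pvGB xs ys) (fun a b => (pvT xs ys a b).1) n m
    (pvT_step_B xs ys) (by omega) (n - 1) 1 _ sh2 (by omega) (by omega) ?_ ?_ i j hi hj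
  · intro i' j' hi' hj'
    have : i' = 0 := by omega
    subst this
    rw [heq2 j' hj']
    simp [pvT_0j]
  · intro i' hi'
    by_cases h0 : i' = 0
    · subst h0
      rw [heq2 0 (by omega)]
      simp [pvT_0j]
    · rw [hpr2 i' 0 (Or.inr h0), heq1 i' hi']
      simp [pvT_i0]

-- backtrack correctness: the loop reproduces exactly the strings of pvT
lemma pvBt_correct (xs ys : List Char) (cost : List (List Int))
    (hcost : ∀ i j, i ≤ xs.length → j ≤ ys.length → pvMget 0 cost i j = (pvT xs ys i j).1) :
    ∀ (N i j : Nat), i + j ≤ N → i ≤ xs.length → j ≤ ys.length → ∀ (ax ay : List Char),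
    ∃ fi fj dx dy, pvBtLoop xs ys cost i j ax ay = (fi, fj, ax ++ dx, ay ++ dy) ∧
      xs.take fi ++ (List.replicate fj '-' ++ dx.reverse) = (pvT xs ys i j).2.1 ∧
      List.replicate fi '-' ++ (ys.take fj ++ dy.reverse) = (pvT xs ys i j).2.2 := by
  intro N
  induction N with
  | zero =>
    intro i j hN hi hj ax ay
    have hi0 : i = 0 := by omega
    have hj0 : j = 0 := by omega
    subst hi0; subst hj0
    exact ⟨0, 0, [], [], by simp [pvBtLoop], by simp [pvT_i0], by simp [pvT_i0]⟩
  | succ N ih =>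
    intro i j hN hi hj ax ay
    match i, j with
    | i, 0 =>
      refine ⟨i, 0, [], [], by simp [pvBtLoop], ?_, ?_⟩ <;> simp [pvT_i0]
    | 0, j + 1 =>
      refine ⟨0, j + 1, [], [], by simp [pvBtLoop], ?_, ?_⟩ <;> simp [pvT_0j]
    | i + 1, j + 1 =>
      by_cases h1 : (xs.getD i ' ' == ys.getD j ' ') = true
      · obtain ⟨fi, fj, dx, dy, heq, hx, hy⟩ :=
          ih i j (by omega) (by omega) (by omega)
            (ax ++ [xs.getD i ' ']) (ay ++ [ys.getD j ' '])
        refine ⟨fi, fj, xs.getD i ' ' :: dx, ys.getD j ' ' :: dy, ?_, ?_, ?_⟩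
        · rw [pvBtLoop]
          simp only [h1, if_true]
          rw [heq]
          simp
        · simp only [pvT, h1, if_true]
          rw [← hx]
          simp
        · simp only [pvT, h1, if_true]
          rw [← hy]
          simp
      · by_cases h2 : pvMget 0 cost (i + 1) j ≤ pvMget 0 cost i (j + 1)
        · obtain ⟨fi, fj, dx, dy, heq, hx, hy⟩ :=
            ih (i + 1) j (by omega) (by omega) (by omega) (ax ++ ['-']) (ay ++ [ys.getD j ' '])
          have h2' : (pvT xs ys (i + 1) j).1 ≤ (pvT xs ys i (j + 1)).1 := by
            rw [← hcost (i + 1) j (by omega) (by omega), ← hcost i (j + 1) (by omega) (by omega)]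
            exact h2
          refine ⟨fi, fj, '-' :: dx, ys.getD j ' ' :: dy, ?_, ?_, ?_⟩
          · rw [pvBtLoop]
            simp only [h1, Bool.false_eq_true, if_false, h2, if_true]
            rw [heq]
            simp
          · simp only [pvT, h1, Bool.false_eq_true, if_false, h2', if_true]
            rw [← hx]
            simp
          · simp only [pvT, h1, Bool.false_eq_true, if_false, h2', if_true]
            rw [← hy]
            simp
        · obtain ⟨fi, fj, dx, dy, heq, hx, hy⟩ :=
            ih i (j + 1) (by omega) (by omega) (by omega) (ax ++ [xs.getD i ' ']) (ay ++ ['-'])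
          have h2' : ¬ (pvT xs ys (i + 1) j).1 ≤ (pvT xs ys i (j + 1)).1 := by
            rw [← hcost (i + 1) j (by omega) (by omega), ← hcost i (j + 1) (by omega) (by omega)]
            exact h2
          refine ⟨fi, fj, xs.getD i ' ' :: dx, '-' :: dy, ?_, ?_, ?_⟩
          · rw [pvBtLoop]
            simp only [h1, Bool.false_eq_true, if_false, h2, if_false]
            rw [heq]
            simp
          · simp only [pvT, h1, Bool.false_eq_true, if_false, h2', if_false]
            rw [← hx]
            simp
          · simp only [pvT, h1, Bool.false_eq_true, if_false, h2', if_false]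
            rw [← hy]
            simp

-- the two ports both return (score, motifs) of pvT at (|x|, |y|)
lemma pvA_final (x y : String) :
    aligner_dyn_affiche x y =
      ((pvT x.toList y.toList x.toList.length y.toList.length).1,
       String.mk (pvT x.toList y.toList x.toList.length y.toList.length).2.1,
       String.mk (pvT x.toList y.toList x.toList.length y.toList.length).2.2) := by
  simp only [aligner_dyn_affiche]
  simp only [pvBodyA_eq]
  have h := pvTableA x.toList y.toList x.toList.length y.toList.length (by omega) (by omega)
  simp only [Nat.add_sub_cancel] at h ⊢
  rw [h]

lemma pvB_final (x y : String) :
    aligner_dyn_affiche_alt x y =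
      ((pvT x.toList y.toList x.toList.length y.toList.length).1,
       String.mk (pvT x.toList y.toList x.toList.length y.toList.length).2.1,
       String.mk (pvT x.toList y.toList x.toList.length y.toList.length).2.2) := by
  simp only [aligner_dyn_affiche_alt]
  simp only [pvBodyB_eq]
  have hcost : ∀ i j, i ≤ x.toList.length → j ≤ y.toList.length →
      pvMget 0
        ((List.range' 1 x.toList.length).foldl (fun s i =>
          (List.range' 1 y.toList.length).foldl (fun s j => pvStep 0 (pvGB x.toList y.toList) s i j) s)
          ((List.range (y.toList.length + 1)).foldl (fun s j => pvMset s 0 j (j : Int))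
            ((List.range (x.toList.length + 1)).foldl (fun s i => pvMset s i 0 (i : Int))
              ((List.range (x.toList.length + 1)).map
                (fun _ => (List.range (y.toList.length + 1)).map (fun _ => (0 : Int))))))) i j
      = (pvT x.toList y.toList i j).1 := by
    intro i j hi hj
    exact pvTableB x.toList y.toList i j (by omega) (by omega)
  obtain ⟨fi, fj, dx, dy, heq, hx, hy⟩ :=
    pvBt_correct x.toList y.toList _ hcost (x.toList.length + y.toList.length)
      x.toList.length y.toList.length (by omega) (by omega) (by omega) [] []
  rw [heq, hcost x.toList.length y.toList.length (by omega) (by omega)]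
  simp only [List.nil_append]
  rw [hx, hy]

-- ===== VERDICT (by name: the statement is the Claim_ definition above) =====
theorem aligner_dyn_affiche_spec : Claim_equal_aligner_dyn_affiche := by
  intro x y _
  unfold Spec_aligner_dyn_affiche
  rw [pvA_final, pvB_final]
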